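-- pv_equiv track=rewrite | github.com/Hien1725/AdventOfCode2023 | day 3/day3part1.py | get_indexes_and_numbers
-- ===== SOURCE A (Python) =====
-- def get_indexes_and_numbers(line):
--     """Finds indexes and corresponding numbers in a line."""
--     last_index = len(line) - 1
--
--     number_positions = []
--
--     whole_number = ''
--     is_first = True
--     for index, char in enumerate(line):
--         if char.isdigit():
--             if is_first == True:
--                 i = index
--             whole_number += char
--             is_first = False
--
--             if index == last_index or not line[index + 1].isdigit():
--                 number_positions.append((i, int(whole_number)))
--
--         else:
--             is_first = True
--             whole_number = ''
--
--     return number_positions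
-- ===== SOURCE B (Python) =====
-- def get_indexes_and_numbers(line):
--     """Finds indexes and corresponding numbers in a line."""
--     number_positions = []
--     i = 0
--     n = len(line)
--     while i < n:
--         if line[i].isdigit():
--             j = i
--             while j < n and line[j].isdigit():
--                 j += 1
--             number_positions.append((i, int(line[i:j])))
--             i = j
--         else:
--             i += 1
--     return number_positions
-- ===== Notes on version B (the rewrite author's own statement) =====
-- stated objective: simpler
-- what changed: Replaces the per-character state machine (is_first flag, accumulated whole_number string, lookahead at line[index+1]) with a run-based scan: on meeting a digit, advance an inner cursor to the end of the digit run and emit (start, int(slice)) in one step.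
import Mathlib
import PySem

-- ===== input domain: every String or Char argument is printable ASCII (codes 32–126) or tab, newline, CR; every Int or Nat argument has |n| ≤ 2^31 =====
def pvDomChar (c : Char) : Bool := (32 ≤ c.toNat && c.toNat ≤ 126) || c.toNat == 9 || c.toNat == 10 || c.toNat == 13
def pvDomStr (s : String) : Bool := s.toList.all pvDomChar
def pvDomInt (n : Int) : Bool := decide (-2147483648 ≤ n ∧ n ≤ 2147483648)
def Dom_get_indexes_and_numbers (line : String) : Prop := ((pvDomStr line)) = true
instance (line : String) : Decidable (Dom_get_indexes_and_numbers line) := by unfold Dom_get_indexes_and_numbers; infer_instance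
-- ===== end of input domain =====

-- B replaces A's per-character state machine (is_first flag, growing whole_number,
-- lookahead at line[index+1]) with a simpler run-based scan: at a digit, consume the
-- whole digit run at once and emit (start, int(run)).  Objective: simpler.

-- ===== PORT A =====
-- int(s) on the accumulated digit string (always parses on the digit strings both ports build)
def pvNum (cs : List Char) : Int := (PySem.Int.ofStr? (String.mk cs)).getD 0

-- line[i].isdigit() guarded by the short-circuit 'index == last_index or …' (the none case is unreachable)
def pvDigitAt (cs : List Char) (i : Int) : Bool :=
  match PySem.List.pyGet? cs i with
  | some c => PySem.Chars.isdigit c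
  | none => false

-- the for-loop of A, one recursive step per enumerated character; state = (acc, whole_number, is_first, i)
def pvAGo (cs : List Char) (last : Int) :
    List (Int × Char) → List (Int × Int) → List Char → Bool → Int → List (Int × Int)
  | [], acc, _, _, _ => acc
  | (index, char) :: rest, acc, whole, isFirst, i =>
    if PySem.Chars.isdigit char then
      let i' := if isFirst then index else i
      let whole' := whole ++ [char]
      if index == last || !(pvDigitAt cs (index + 1)) then
        pvAGo cs last rest (acc ++ [(i', pvNum whole')]) whole' false i'
      else
        pvAGo cs last rest acc whole' false i'
    else
      pvAGo cs last rest acc [] true i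

def get_indexes_and_numbers (line : String) : List (Int × Int) :=
  pvAGo line.toList ((line.toList.length : Int) - 1)
    (PySem.List.enumerate line.toList 0) [] [] true 0

-- ===== PORT B =====
-- the while-loop of B: inner 'while j < n and line[j].isdigit()' = takeWhile/dropWhile on the suffix
def pvBGo : List Char → Nat → List (Int × Int)
  | [], _ => []
  | c :: rest, i =>
    if h : PySem.Chars.isdigit c then
      let run := List.takeWhile PySem.Chars.isdigit (c :: rest)
      ((i : Int), pvNum run) :: pvBGo (List.dropWhile PySem.Chars.isdigit (c :: rest)) (i + run.length)
    else
      pvBGo rest (i + 1)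
termination_by cs _ => cs.length
decreasing_by
  · simp only [List.dropWhile_cons, h, if_true]
    exact Nat.lt_succ_of_le (List.length_dropWhile_le _ _)
  · simp

def get_indexes_and_numbers_alt (line : String) : List (Int × Int) :=
  pvBGo line.toList 0

-- ===== PRECONDITION & SPEC =====
def Spec_get_indexes_and_numbers (line : String) (out : List (Int × Int)) : Prop := out = get_indexes_and_numbers_alt line
instance (line : String) (out : List (Int × Int)) : Decidable (Spec_get_indexes_and_numbers line out) := by unfold Spec_get_indexes_and_numbers; infer_instance

-- ===== CLAIM (what is proved, stated in full; the proofs are below) =====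
def Claim_equal_get_indexes_and_numbers : Prop := ∀ (line : String), Dom_get_indexes_and_numbers line → Spec_get_indexes_and_numbers line (get_indexes_and_numbers line)

-- ===== LEMMAS AND PROOFS =====

theorem pvAGo_cons (cs : List Char) (last : Int) (index : Int) (char : Char)
    (rest : List (Int × Char)) (acc : List (Int × Int)) (whole : List Char)
    (isFirst : Bool) (i : Int) :
    pvAGo cs last ((index, char) :: rest) acc whole isFirst i =
      if PySem.Chars.isdigit char then
        if index == last || !(pvDigitAt cs (index + 1)) then
          pvAGo cs last rest
            (acc ++ [((if isFirst then index else i), pvNum (whole ++ [char]))])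
            (whole ++ [char]) false (if isFirst then index else i)
        else
          pvAGo cs last rest acc (whole ++ [char]) false (if isFirst then index else i)
      else
        pvAGo cs last rest acc [] true i := rfl

theorem pv_dropWhile_head {p : Char → Bool} :
    ∀ (l : List Char) (d : Char) (t : List Char), l.dropWhile p = d :: t → p d = false := by
  intro l
  induction l with
  | nil => intro d t h; simp at h
  | cons c cs ih =>
    intro d t h
    by_cases hc : p c = true
    · simp [List.dropWhile_cons, hc] at h; exact ih _ _ h
    · simp [List.dropWhile_cons, hc] at h; simp [h.1] at hc; simpa [h.1] using hc

theorem pv_takeWhile_nil_dropWhile {p : Char → Bool} (l : List Char)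
    (h : l.takeWhile p = []) : l.dropWhile p = l := by
  cases l with
  | nil => rfl
  | cons c cs =>
    by_cases hc : p c = true
    · simp [List.takeWhile_cons, hc] at h
    · simp [List.dropWhile_cons, hc]

-- basic index/length facts extracted from 'cs.drop k = c :: rest'
theorem pv_drop_facts (cs : List Char) (k : Nat) (c : Char) (rest : List Char)
    (h : cs.drop k = c :: rest) :
    cs.length = k + 1 + rest.length ∧ cs.drop (k + 1) = rest ∧ cs[k + 1]? = rest.head? := by
  have hlen : (cs.drop k).length = cs.length - k := List.length_drop
  rw [h] at hlen
  simp at hlen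
  refine ⟨by omega, ?_, ?_⟩
  · have : cs.drop (k + 1) = (cs.drop k).drop 1 := by
      rw [List.drop_drop]
    rw [this, h]; simp
  · have : (cs.drop k)[1]? = cs[k + 1]? := by
      rw [List.getElem?_drop]
    rw [← this, h]
    cases rest <;> simp

-- evaluate A's append condition 'index == last_index or not line[index+1].isdigit()'
theorem pv_cond_eval (cs : List Char) (k : Nat) (c : Char) (rest : List Char)
    (h : cs.drop k = c :: rest) :
    (((k : Int) == (cs.length : Int) - 1) || !(pvDigitAt cs ((k : Int) + 1)))
      = (rest.takeWhile PySem.Chars.isdigit == []) := by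
  obtain ⟨hlen, -, hget⟩ := pv_drop_facts cs k c rest h
  have hg : pvDigitAt cs ((k : Int) + 1)
      = (match rest.head? with | some d => PySem.Chars.isdigit d | none => false) := by
    unfold pvDigitAt
    have : ((k : Int) + 1) = ((k + 1 : Nat) : Int) := by push_cast; ring
    rw [this, PySem.List.pyGet?_natCast, hget]
  cases rest with
  | nil =>
    simp at hg
    simp [hg, List.takeWhile_nil]
  | cons d rest' =>
    simp at hg
    by_cases hd : PySem.Chars.isdigit d = true
    · have hk : ¬ ((k : Int) = (cs.length : Int) - 1) := by
        simp at hlen; omega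
      simp [hg, hd, List.takeWhile_cons, hk]
    · have hd' : PySem.Chars.isdigit d = false := by simpa using hd
      simp [hg, hd', List.takeWhile_cons]

-- A consumes an already-started digit run r (state is_first=false, whole=w, i=i0)
-- and appends (i0, int(w ++ r)) when the run ends.
theorem pv_run (r : List Char) : ∀ (t : List Char) (cs : List Char) (k : Nat)
    (w : List Char) (i0 : Int) (acc : List (Int × Int)),
    cs.drop k = r ++ t → r ≠ [] → (∀ c ∈ r, PySem.Chars.isdigit c = true) →
    (∀ d t', t = d :: t' → PySem.Chars.isdigit d = false) →
    pvAGo cs ((cs.length : Int) - 1) (PySem.List.enumerate (r ++ t) (k : Int)) acc w false i0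
      = pvAGo cs ((cs.length : Int) - 1)
          (PySem.List.enumerate t ((k + r.length : Nat) : Int))
          (acc ++ [(i0, pvNum (w ++ r))]) (w ++ r) false i0 := by
  induction r with
  | nil => intro _ _ _ _ _ _ _ hne _ _; exact absurd rfl hne
  | cons d r' ih =>
    intro t cs k w i0 acc hdrop _ hdig hnd
    have hd : PySem.Chars.isdigit d = true := hdig d (by simp)
    rw [List.cons_append, PySem.List.enumerate_cons]
    have hcond := pv_cond_eval cs k d (r' ++ t) (by simpa using hdrop)
    rw [pvAGo_cons]
    simp only [hd, if_true, if_false, Bool.false_eq_true]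
    rw [hcond]
    cases hr' : r' with
    | nil =>
      subst hr'
      have ht : t.takeWhile PySem.Chars.isdigit = [] := by
        cases t with
        | nil => simp
        | cons x xs => simp [List.takeWhile_cons, hnd x xs rfl]
      simp only [List.nil_append] at *
      simp only [ht, beq_self_eq_true, if_true]
      have hstep : ((k : Int) + 1) = ((k + 1 : Nat) : Int) := by push_cast; ring
      rw [hstep]
      norm_num
    | cons e r'' =>
      subst hr'
      have he : PySem.Chars.isdigit e = true := hdig e (by simp)
      have : ((e :: r'') ++ t).takeWhile PySem.Chars.isdigit ≠ [] := by
        simp [List.takeWhile_cons, he]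
      simp only [beq_iff_eq] at *
      rw [if_neg this]
      obtain ⟨-, hdrop', -⟩ := pv_drop_facts cs k d ((e :: r'') ++ t) (by simpa using hdrop)
      have hstep : ((k : Int) + 1) = ((k + 1 : Nat) : Int) := by push_cast; ring
      rw [hstep, ih t cs (k + 1) (w ++ [d]) i0 acc hdrop' (by simp) (fun c hc => hdig c (by simp [hc])) hnd]
      have h1 : k + 1 + (e :: r'').length = k + (d :: e :: r'').length := by simp; omega
      have h2 : w ++ [d] ++ (e :: r'') = w ++ (d :: e :: r'') := by simp
      rw [h1, h2]

-- master induction: from a 'safe' state (fresh, or the next char is not a digit)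
-- A's remaining loop computes acc ++ B's scan of the remaining suffix.
theorem pv_master (n : Nat) : ∀ (s : List Char) (cs : List Char) (k : Nat)
    (acc : List (Int × Int)) (w : List Char) (f : Bool) (i0 : Int),
    s.length ≤ n → cs.drop k = s →
    ((f = true ∧ w = []) ∨ (∀ d t', s = d :: t' → PySem.Chars.isdigit d = false)) →
    pvAGo cs ((cs.length : Int) - 1) (PySem.List.enumerate s (k : Int)) acc w f i0
      = acc ++ pvBGo s k := by
  induction n with
  | zero =>
    intro s cs k acc w f i0 hn _ _
    have : s = [] := by cases s <;> simp_all
    subst this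
    simp [PySem.List.enumerate_nil, pvAGo, pvBGo]
  | succ n ih =>
    intro s cs k acc w f i0 hn hdrop hpre
    cases s with
    | nil => simp [PySem.List.enumerate_nil, pvAGo, pvBGo]
    | cons c rest =>
      obtain ⟨hlen, hdrop', -⟩ := pv_drop_facts cs k c rest hdrop
      have hstep : ((k : Int) + 1) = ((k + 1 : Nat) : Int) := by push_cast; ring
      rw [PySem.List.enumerate_cons]
      by_cases hc : PySem.Chars.isdigit c = true
      · -- digit: the state must be fresh
        have hfw : f = true ∧ w = [] := by
          rcases hpre with h | h
          · exact h
          · exact absurd hc (by simp [h c rest rfl])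
        obtain ⟨hf, hw⟩ := hfw
        subst hf; subst hw
        have hcond := pv_cond_eval cs k c rest hdrop
        rw [pvAGo_cons]
        simp only [hc, if_true]
        rw [hcond]
        unfold pvBGo
        simp only [hc, reduceDIte, List.takeWhile_cons, if_true, List.dropWhile_cons]
        cases hr : rest.takeWhile PySem.Chars.isdigit with
        | nil =>
          have hrest : rest.dropWhile PySem.Chars.isdigit = rest :=
            pv_takeWhile_nil_dropWhile rest hr
          have hndrest : ∀ d t', rest = d :: t' → PySem.Chars.isdigit d = false := by
            intro d t' hdt
            rw [hdt, List.takeWhile_cons] at hr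
            by_contra hcon
            simp [(by simpa using hcon : PySem.Chars.isdigit d = true)] at hr
          simp only [beq_self_eq_true, if_true]
          rw [hstep, ih rest cs (k + 1) (acc ++ [((k : Int), pvNum ([] ++ [c]))]) ([] ++ [c]) false (k : Int)
            (by simp at hn ⊢; omega) hdrop' (Or.inr hndrest)]
          simp [hrest]
        | cons e r'' =>
          have hne : rest.takeWhile PySem.Chars.isdigit ≠ [] := by rw [hr]; simp
          simp only [beq_iff_eq]
          rw [if_neg (List.cons_ne_nil e r'')]
          have hsplit : rest.takeWhile PySem.Chars.isdigit ++ rest.dropWhile PySem.Chars.isdigit = rest :=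
            List.takeWhile_append_dropWhile
          have hdignd : ∀ d t', rest.dropWhile PySem.Chars.isdigit = d :: t' → PySem.Chars.isdigit d = false :=
            fun d t' h => pv_dropWhile_head rest d t' h
          have hdrop2 : cs.drop (k + 1) = rest.takeWhile PySem.Chars.isdigit ++ rest.dropWhile PySem.Chars.isdigit := by
            rw [hsplit]; exact hdrop'
          have hdrop3 : cs.drop (k + 1 + (rest.takeWhile PySem.Chars.isdigit).length)
              = rest.dropWhile PySem.Chars.isdigit := by
            have h1 : cs.drop (k + 1 + (rest.takeWhile PySem.Chars.isdigit).length)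
                = (cs.drop (k + 1)).drop (rest.takeWhile PySem.Chars.isdigit).length := by
              rw [List.drop_drop]
            rw [h1, hdrop2, List.drop_left]
          rw [hstep]
          conv_lhs => rw [show rest = rest.takeWhile PySem.Chars.isdigit ++ rest.dropWhile PySem.Chars.isdigit from hsplit.symm]
          rw [pv_run (rest.takeWhile PySem.Chars.isdigit) (rest.dropWhile PySem.Chars.isdigit) cs (k + 1)
            ([] ++ [c]) (k : Int) acc hdrop2 hne (fun x hx => List.mem_takeWhile_imp hx) hdignd]
          rw [ih (rest.dropWhile PySem.Chars.isdigit) cs (k + 1 + (rest.takeWhile PySem.Chars.isdigit).length)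
            _ _ false (k : Int)
            (le_trans (List.length_dropWhile_le _ _) (by simp only [List.length_cons] at hn; omega))
            hdrop3 (Or.inr hdignd)]
          have hlen2 : k + 1 + (rest.takeWhile PySem.Chars.isdigit).length
              = k + (c :: rest.takeWhile PySem.Chars.isdigit).length := by simp; omega
          rw [hlen2]
          simp only [List.nil_append, List.append_assoc, List.singleton_append]
          refine congrArg (acc ++ ·) (congrArg₂ (· :: ·) ?_ ?_)
          · rw [hr]
          · rw [hr]
      · -- non-digit: reset and recurse fresh
        have hc' : PySem.Chars.isdigit c = false := by simpa using hc
        rw [pvAGo_cons]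
        simp only [hc', Bool.false_eq_true, if_false]
        unfold pvBGo
        simp only [hc', Bool.false_eq_true, reduceDIte]
        rw [hstep]
        exact ih rest cs (k + 1) acc [] true i0 (by simp at hn ⊢; omega) hdrop' (Or.inl ⟨rfl, rfl⟩)

-- ===== VERDICT (by name: the statement is the Claim_ definition above) =====
theorem get_indexes_and_numbers_spec : Claim_equal_get_indexes_and_numbers := by
  intro line _
  unfold Spec_get_indexes_and_numbers get_indexes_and_numbers get_indexes_and_numbers_alt
  have := pv_master line.toList.length line.toList line.toList 0 [] [] true 0
    (le_refl _) (by simp) (Or.inl ⟨rfl, rfl⟩)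
  simpa using this
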